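-- pv_equiv track=rewrite | github.com/halo-narval/hamp_radar | hamp_radar/writezarr.py | merge_encodings
-- ===== SOURCE A (Python) =====
-- def merge_encodings(e1: dict, e2: dict):
--     e3 = {**e1}
--     for x in set(e1.keys()) & set(e2.keys()):
--         if set(e2[x]) & set(e3[x]) == set():
--             e3[x].update(e2[x])
--         else:
--             raise KeyError(f"encodings have conflicting keys for {x}")
--     for x in set(e2.keys()) - set(e1.keys()):
--         e3[x] = e2[x]
--     return e3
-- ===== SOURCE B (Python) =====
-- def merge_encodings(e1: dict, e2: dict):
--     e3 = {}
--     for x in {**e1, **e2}: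
--         a = e1.get(x, {})
--         b = e2.get(x, {})
--         m = {**a, **b}
--         if len(m) != len(a) + len(b):
--             raise KeyError(f"encodings have conflicting keys for {x}")
--         e3[x] = m
--     return e3
-- ===== Notes on version B (the rewrite author's own statement) =====
-- stated objective: alternative
-- what changed: A copies e1 and mutates the copy in two set-partition passes (a set-intersection pass that updates shared keys after a set-intersection conflict test, then a set-difference pass that adds new keys); B builds the result dict from scratch in one loop over the union keyset {**e1, **e2}, merging each key's two inner dicts with {**a, **b} and detecting conflicts by a length check (len(m) != len(a)+len(b)) instead of set intersection.
import Mathlib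
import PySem

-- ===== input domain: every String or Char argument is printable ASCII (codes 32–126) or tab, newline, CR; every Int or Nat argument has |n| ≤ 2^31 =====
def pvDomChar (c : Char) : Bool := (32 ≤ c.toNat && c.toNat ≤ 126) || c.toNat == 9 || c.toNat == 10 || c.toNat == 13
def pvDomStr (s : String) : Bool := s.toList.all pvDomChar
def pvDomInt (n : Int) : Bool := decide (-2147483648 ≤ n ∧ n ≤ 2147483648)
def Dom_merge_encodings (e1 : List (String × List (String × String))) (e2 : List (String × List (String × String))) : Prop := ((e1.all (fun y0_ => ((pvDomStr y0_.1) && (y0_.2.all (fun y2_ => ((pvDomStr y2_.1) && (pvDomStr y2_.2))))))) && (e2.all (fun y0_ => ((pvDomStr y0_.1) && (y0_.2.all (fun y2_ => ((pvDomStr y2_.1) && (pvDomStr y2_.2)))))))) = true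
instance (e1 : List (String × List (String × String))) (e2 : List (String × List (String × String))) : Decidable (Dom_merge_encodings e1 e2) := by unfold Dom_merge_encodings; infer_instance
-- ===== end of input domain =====

-- B builds the result dict from scratch over the union keyset, merging each key's two inner
-- dicts and checking conflicts by a length comparison, instead of A's copy-then-mutate with
-- two set-partition passes (objective: alternative; no speed claim).
-- NOTE on side effects: Python A mutates e1's inner dicts in place (e3[x].update(...)); B
-- builds fresh dicts and mutates nothing. The equivalence proved here is about the RETURN value.
-- Output note: A's appended-key order comes from Python set iteration; dicts are compared as
-- dicts (order-insensitively), and under Pre_ both ports even agree on the literal item list.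

-- ===== PORT A =====
-- e3[x].update(e2[x]) on the inner dict: insert every pair of b into dict a (B's {**a, **b} is the same merge)
def pvUpd (a b : List (String × String)) : List (String × String) :=
  ((PySem.Dict.mk a).update b).items

def merge_encodings (e1 : List (String × List (String × String))) (e2 : List (String × List (String × String))) : List (String × List (String × String)) :=
  -- e3 = {**e1}
  let e3 : PySem.Dict String (List (String × String)) := PySem.Dict.mk e1
  -- for x in set(e1.keys()) & set(e2.keys()):
  let shared := PySem.Set.inter (PySem.Set.ofList (e1.map Prod.fst)) (PySem.Set.ofList (e2.map Prod.fst))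
  let e3 := shared.foldl (fun d x =>
      -- if set(e2[x]) & set(e3[x]) == set():
      if PySem.Set.equal (PySem.Set.inter (PySem.Set.ofList (((PySem.Dict.mk e2).getD x []).map Prod.fst)) (PySem.Set.ofList ((d.getD x []).map Prod.fst))) PySem.Set.empty
      then d.insert x (pvUpd (d.getD x []) ((PySem.Dict.mk e2).getD x []))  -- e3[x].update(e2[x])
      else d  -- Python: raise KeyError(...) — such inputs are outside Pre_
    ) e3
  -- for x in set(e2.keys()) - set(e1.keys()): e3[x] = e2[x]
  let only2 := PySem.Set.diff (PySem.Set.ofList (e2.map Prod.fst)) (PySem.Set.ofList (e1.map Prod.fst))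
  (only2.foldl (fun d x => d.insert x ((PySem.Dict.mk e2).getD x [])) e3).items

-- ===== PORT B =====
-- e3 = {}; for x in {**e1, **e2}: a = e1.get(x, {}); b = e2.get(x, {}); m = {**a, **b};
--   if len(m) != len(a) + len(b): raise; e3[x] = m
def merge_encodings_alt (e1 : List (String × List (String × String))) (e2 : List (String × List (String × String))) : List (String × List (String × String)) :=
  ((((PySem.Dict.mk e1).update e2).keys).foldl (fun d x =>
      if (pvUpd ((PySem.Dict.mk e1).getD x []) ((PySem.Dict.mk e2).getD x [])).length ≠ ((PySem.Dict.mk e1).getD x []).length + ((PySem.Dict.mk e2).getD x []).length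
      then d  -- Python: raise KeyError(...) — such inputs are outside Pre_
      else d.insert x (pvUpd ((PySem.Dict.mk e1).getD x []) ((PySem.Dict.mk e2).getD x []))  -- e3[x] = m
    ) PySem.Dict.empty).items

-- ===== PRECONDITION & SPEC =====
-- Pre_ excludes (a) association lists with duplicate outer or inner keys, which do not represent
-- any Python dict input (the Python arguments are dicts of dicts), and (b) inputs where a key
-- shared by e1 and e2 has overlapping inner keys, on which Python A raises KeyError.
def Pre_merge_encodings (e1 : List (String × List (String × String))) (e2 : List (String × List (String × String))) : Prop :=
  (e1.map Prod.fst).Nodup ∧ (e2.map Prod.fst).Nodup ∧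
  (∀ p ∈ e1, (p.2.map Prod.fst).Nodup) ∧ (∀ q ∈ e2, (q.2.map Prod.fst).Nodup) ∧
  ∀ p ∈ e1, ∀ q ∈ e2, p.1 = q.1 → ∀ s ∈ q.2.map Prod.fst, s ∉ p.2.map Prod.fst
instance (e1 : List (String × List (String × String))) (e2 : List (String × List (String × String))) : Decidable (Pre_merge_encodings e1 e2) := by unfold Pre_merge_encodings; infer_instance

def pvWitness_merge_encodings : (List (String × List (String × String))) × (List (String × List (String × String))) :=
  ([("a", [("x", "1")])], [("a", [("y", "2")]), ("b", [("z", "3")])])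

def Spec_merge_encodings (e1 : List (String × List (String × String))) (e2 : List (String × List (String × String))) (out : List (String × List (String × String))) : Prop := out = merge_encodings_alt e1 e2
instance (e1 : List (String × List (String × String))) (e2 : List (String × List (String × String))) (out : List (String × List (String × String))) : Decidable (Spec_merge_encodings e1 e2 out) := by unfold Spec_merge_encodings; infer_instance

-- ===== CLAIM (what is proved, stated in full; the proofs are below) =====
def Claim_equal_merge_encodings : Prop := ∀ (e1 : List (String × List (String × String))) (e2 : List (String × List (String × String))), Dom_merge_encodings e1 e2 → Pre_merge_encodings e1 e2 → Spec_merge_encodings e1 e2 (merge_encodings e1 e2)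

-- ===== LEMMAS AND PROOFS =====

-- two key lists with no common element have empty set-intersection
lemma pv_inter_nil {l m : List String} (h : ∀ s ∈ l, s ∉ m) :
    PySem.Set.inter (PySem.Set.ofList l) (PySem.Set.ofList m) = [] := by
  simp only [PySem.Set.inter, List.filter_eq_nil_iff]
  intro a ha
  rw [PySem.Set.mem_ofList] at ha
  simpa [PySem.Set.contains, List.contains_iff_mem, PySem.Set.mem_ofList] using h a ha

-- {**a, **b} with nodup, a-disjoint keys of b appends b to a
lemma pvUpd_disjoint (a b : List (String × String)) (hb : (b.map Prod.fst).Nodup)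
    (hd : ∀ s ∈ b.map Prod.fst, s ∉ a.map Prod.fst) : pvUpd a b = a ++ b := by
  show (b.foldl (fun d p => d.insert p.1 p.2) (PySem.Dict.mk a)).items = a ++ b
  rw [PySem.Dict.items_foldl_insert_fresh b Prod.fst Prod.snd (PySem.Dict.mk a)
    (by intro p hp
        rw [PySem.Dict.contains_eq_decide_mem_keys]
        simpa [PySem.Dict.keys] using hd p.1 (List.mem_map_of_mem hp)) hb]
  simp

lemma pvUpd_nil_right (a : List (String × String)) : pvUpd a [] = a := rfl

-- A's shared-key loop: each shared key's value is updated in place (positions kept)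
lemma pv_loopA (e2 : List (String × List (String × String))) (S : List String)
    (d : PySem.Dict String (List (String × String)))
    (hnd : d.keys.Nodup) (hS : S.Nodup)
    (hsub : ∀ x ∈ S, d.contains x = true)
    (hok : ∀ x ∈ S, ∀ w, d.get? x = some w →
      PySem.Set.inter (PySem.Set.ofList (((PySem.Dict.mk e2).getD x []).map Prod.fst)) (PySem.Set.ofList (w.map Prod.fst)) = []) :
    (S.foldl (fun d x =>
      if PySem.Set.equal (PySem.Set.inter (PySem.Set.ofList (((PySem.Dict.mk e2).getD x []).map Prod.fst)) (PySem.Set.ofList ((d.getD x []).map Prod.fst))) PySem.Set.empty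
      then d.insert x (pvUpd (d.getD x []) ((PySem.Dict.mk e2).getD x []))
      else d) d).items
    = d.items.map (fun p => if p.1 ∈ S then (p.1, pvUpd p.2 ((PySem.Dict.mk e2).getD p.1 [])) else p) := by
  induction S generalizing d with
  | nil => simp
  | cons x S ih =>
    have hc : d.contains x = true := hsub x (by simp)
    obtain ⟨w, hw⟩ : ∃ w, d.get? x = some w := by
      have h := hc; rw [PySem.Dict.contains_eq_isSome_get?] at h
      exact Option.isSome_iff_exists.mp h
    have hgd : d.getD x [] = w := by simp [PySem.Dict.getD_eq_get?_getD, hw]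
    have hint := hok x (by simp) w hw
    have htrue : PySem.Set.equal (PySem.Set.inter (PySem.Set.ofList (((PySem.Dict.mk e2).getD x []).map Prod.fst)) (PySem.Set.ofList ((d.getD x []).map Prod.fst))) PySem.Set.empty = true := by
      rw [hgd, hint]; rfl
    have hxS : x ∉ S := (List.nodup_cons.mp hS).1
    rw [List.foldl_cons, if_pos htrue, hgd]
    rw [ih (d.insert x (pvUpd w ((PySem.Dict.mk e2).getD x [])))
      (by rw [PySem.Dict.keys_insert_of_contains _ _ hc]; exact hnd)
      ((List.nodup_cons.mp hS).2)
      (by intro y hy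
          rw [PySem.Dict.contains_insert]
          simp [hsub y (List.mem_cons_of_mem _ hy)])
      (by intro y hy w' hw'
          have hyx : y ≠ x := fun h => hxS (h ▸ hy)
          rw [PySem.Dict.get?_insert_of_ne _ _ hyx] at hw'
          exact hok y (List.mem_cons_of_mem _ hy) w' hw')]
    rw [PySem.Dict.items_insert_of_contains _ _ hc, List.map_map]
    refine List.map_congr_left ?_
    intro p hp
    have hget : d.get? p.1 = some p.2 := PySem.Dict.get?_of_mem_items _ hp hnd
    by_cases hpx : p.1 = x
    · have hpw : p.2 = w := by
        rw [hpx] at hget; rw [hget] at hw; exact (Option.some.injEq _ _).mp hw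
      simp [Function.comp, hpx, hxS, hpw]
    · simp [Function.comp, hpx, List.mem_cons]

-- appending loop over fresh keys (specialisation of PySem.Dict.items_foldl_insert_fresh)
lemma pv_append (e2 : List (String × List (String × String))) (L : List String)
    (d : PySem.Dict String (List (String × String)))
    (hf : ∀ a ∈ L, d.contains a = false) (hL : L.Nodup) :
    (L.foldl (fun d x => d.insert x ((PySem.Dict.mk e2).getD x [])) d).items
      = d.items ++ L.map (fun x => (x, (PySem.Dict.mk e2).getD x [])) := by
  simpa using PySem.Dict.items_foldl_insert_fresh L (fun a => a)
    (fun a => (PySem.Dict.mk e2).getD a []) d hf (by simpa using hL)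

-- B's loop: all fresh distinct keys, and the conflict branch never fires, so it appends
lemma pv_loopB (K : List String) (F : String → List (String × String)) (cond : String → Prop)
    [DecidablePred cond] (d : PySem.Dict String (List (String × String)))
    (hK : K.Nodup) (hf : ∀ x ∈ K, d.contains x = false) (hp : ∀ x ∈ K, ¬ cond x) :
    (K.foldl (fun d x => if cond x then d else d.insert x (F x)) d).items
      = d.items ++ K.map (fun x => (x, F x)) := by
  induction K generalizing d with
  | nil => simp
  | cons x K ih =>
    have hxK : x ∉ K := (List.nodup_cons.mp hK).1
    rw [List.foldl_cons, if_neg (hp x (by simp))]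
    rw [ih (d.insert x (F x)) ((List.nodup_cons.mp hK).2)
      (by intro y hy
          rw [PySem.Dict.contains_insert]
          have hyx : y ≠ x := fun h => hxK (h ▸ hy)
          simp [hyx, hf y (List.mem_cons_of_mem _ hy)])
      (fun y hy => hp y (List.mem_cons_of_mem _ hy))]
    rw [PySem.Dict.items_insert_of_not_contains _ _ (hf x (by simp))]
    simp

-- ===== VERDICT (by name: the statement is the Claim_ definition above) =====
theorem merge_encodings_spec : Claim_equal_merge_encodings := by
  intro e1 e2 _dom hpre
  obtain ⟨h1, h2, hin1, hin2, hdisj⟩ := hpre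
  have hnd1 : (PySem.Dict.mk e1).keys.Nodup := by simpa [PySem.Dict.keys] using h1
  have hnd2 : (PySem.Dict.mk e2).keys.Nodup := by simpa [PySem.Dict.keys] using h2
  have hmemS : ∀ x, x ∈ PySem.Set.inter (List.map Prod.fst e1) (List.map Prod.fst e2)
      ↔ x ∈ List.map Prod.fst e1 ∧ x ∈ List.map Prod.fst e2 := by
    intro x
    simp [PySem.Set.inter, PySem.Set.contains, List.mem_filter]
  have hmemD : ∀ x, x ∈ PySem.Set.diff (List.map Prod.fst e2) (List.map Prod.fst e1)
      ↔ x ∈ List.map Prod.fst e2 ∧ x ∉ List.map Prod.fst e1 := by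
    intro x
    simp [PySem.Set.diff, PySem.Set.contains, List.mem_filter]
  have hSnd : (PySem.Set.inter (List.map Prod.fst e1) (List.map Prod.fst e2)).Nodup :=
    List.Nodup.filter _ h1
  have hDnd : (PySem.Set.diff (List.map Prod.fst e2) (List.map Prod.fst e1)).Nodup :=
    List.Nodup.filter _ h2
  -- lookup facts
  have hg1 : ∀ p ∈ e1, (PySem.Dict.mk e1).getD p.1 [] = p.2 := by
    intro p hp; exact PySem.Dict.getD_of_mem_items _ hp hnd1 []
  have hg2 : ∀ q ∈ e2, (PySem.Dict.mk e2).getD q.1 [] = q.2 := by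
    intro q hq; exact PySem.Dict.getD_of_mem_items _ hq hnd2 []
  have hg1none : ∀ x, x ∉ List.map Prod.fst e1 → (PySem.Dict.mk e1).getD x [] = [] := by
    intro x hx
    refine PySem.Dict.getD_of_not_contains (PySem.Dict.mk e1) ([] : List (String × String)) ?_
    rw [PySem.Dict.contains_eq_decide_mem_keys]
    simpa [PySem.Dict.keys] using hx
  have hg2none : ∀ x, x ∉ List.map Prod.fst e2 → (PySem.Dict.mk e2).getD x [] = [] := by
    intro x hx
    refine PySem.Dict.getD_of_not_contains (PySem.Dict.mk e2) ([] : List (String × String)) ?_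
    rw [PySem.Dict.contains_eq_decide_mem_keys]
    simpa [PySem.Dict.keys] using hx
  -- the merged inner dict is the concatenation, for every key of e1 or e2
  have hval : ∀ x, x ∈ List.map Prod.fst e1 ∨ x ∈ List.map Prod.fst e2 →
      pvUpd ((PySem.Dict.mk e1).getD x []) ((PySem.Dict.mk e2).getD x [])
        = (PySem.Dict.mk e1).getD x [] ++ (PySem.Dict.mk e2).getD x [] := by
    intro x hx
    by_cases hx1 : x ∈ List.map Prod.fst e1
    · obtain ⟨p, hp, hpx⟩ := List.mem_map.mp hx1
      have e1v : (PySem.Dict.mk e1).getD x [] = p.2 := by rw [← hpx]; exact hg1 p hp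
      by_cases hx2 : x ∈ List.map Prod.fst e2
      · obtain ⟨q, hq, hqx⟩ := List.mem_map.mp hx2
        have e2v : (PySem.Dict.mk e2).getD x [] = q.2 := by rw [← hqx]; exact hg2 q hq
        rw [e1v, e2v]
        exact pvUpd_disjoint p.2 q.2 (hin2 q hq)
          (fun s hs => hdisj p hp q hq (hpx.trans hqx.symm) s hs)
      · rw [hg2none x hx2, pvUpd_nil_right]
        simp
    · have hx2 : x ∈ List.map Prod.fst e2 := hx.resolve_left hx1
      obtain ⟨q, hq, hqx⟩ := List.mem_map.mp hx2
      have e2v : (PySem.Dict.mk e2).getD x [] = q.2 := by rw [← hqx]; exact hg2 q hq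
      rw [hg1none x hx1, e2v]
      refine Eq.trans (pvUpd_disjoint [] q.2 (hin2 q hq) (by simp)) (by simp)
  -- the union keyset of B is e1's keys followed by A's e2-only keys
  have hKeq : ((PySem.Dict.mk e1).update e2).keys
      = List.map Prod.fst e1 ++ PySem.Set.diff (List.map Prod.fst e2) (List.map Prod.fst e1) := by
    show ((e2.foldl (fun d p => d.insert p.1 p.2) (PySem.Dict.mk e1)).keys) = _
    rw [PySem.Dict.keys_foldl_insert_key e2 Prod.fst (fun _ p => p.2) (PySem.Dict.mk e1)]
    have hk : (PySem.Dict.mk e1).keys = List.map Prod.fst e1 := by simp [PySem.Dict.keys]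
    rw [hk, PySem.Set.update_eq_append_filter, PySem.Set.ofList_eq_self_of_nodup _ h2]
    rfl
  have hKnd : ((PySem.Dict.mk e1).update e2).keys.Nodup := PySem.Dict.nodup_keys_update _ _ hnd1
  -- A-side hypotheses
  have hsub : ∀ x ∈ PySem.Set.inter (List.map Prod.fst e1) (List.map Prod.fst e2),
      (PySem.Dict.mk e1).contains x = true := by
    intro x hx
    simp [PySem.Dict.contains_eq_decide_mem_keys, PySem.Dict.keys, ((hmemS x).mp hx).1]
  have hokA : ∀ x ∈ PySem.Set.inter (List.map Prod.fst e1) (List.map Prod.fst e2),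
      ∀ w, (PySem.Dict.mk e1).get? x = some w →
      PySem.Set.inter (PySem.Set.ofList (((PySem.Dict.mk e2).getD x []).map Prod.fst)) (PySem.Set.ofList (w.map Prod.fst)) = [] := by
    intro x hx w hw
    obtain ⟨⟨qa, qb⟩, hq, rfl⟩ := List.mem_map.mp ((hmemS x).mp hx).2
    have hw1 : (qa, w) ∈ e1 := PySem.Dict.mem_items_of_get?_eq_some _ hw
    have hgd2 : (PySem.Dict.mk e2).getD qa [] = qb :=
      PySem.Dict.getD_of_mem_items _ hq hnd2 []
    rw [hgd2]
    exact pv_inter_nil (fun s hs => hdisj (qa, w) hw1 (qa, qb) hq rfl s hs)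
  have hitems := pv_loopA e2 (PySem.Set.inter (List.map Prod.fst e1) (List.map Prod.fst e2))
    (PySem.Dict.mk e1) hnd1 hSnd hsub hokA
  unfold Spec_merge_encodings merge_encodings merge_encodings_alt
  simp only [PySem.Set.ofList_eq_self_of_nodup _ h1, PySem.Set.ofList_eq_self_of_nodup _ h2]
  -- evaluate B: all keys of the union dict are fresh and conflict-free
  rw [pv_loopB ((PySem.Dict.mk e1).update e2).keys
      (fun x => pvUpd ((PySem.Dict.mk e1).getD x []) ((PySem.Dict.mk e2).getD x []))
      (fun x => (pvUpd ((PySem.Dict.mk e1).getD x []) ((PySem.Dict.mk e2).getD x [])).length ≠ ((PySem.Dict.mk e1).getD x []).length + ((PySem.Dict.mk e2).getD x []).length)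
      PySem.Dict.empty hKnd
      (fun x _ => PySem.Dict.contains_empty x)
      ?_]
  · -- evaluate A and compare item lists
    refine Eq.trans (pv_append e2 _ _ ?_ hDnd) ?_
    · intro a ha
      rw [PySem.Dict.contains_eq_decide_mem_keys, PySem.Dict.keys, hitems, List.map_map]
      have hkeys : List.map (Prod.fst ∘ fun p => if p.1 ∈ PySem.Set.inter (List.map Prod.fst e1) (List.map Prod.fst e2) then (p.1, pvUpd p.2 ((PySem.Dict.mk e2).getD p.1 [])) else p) e1 = List.map Prod.fst e1 := by
        refine List.map_congr_left ?_
        intro p hp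
        by_cases h : p.1 ∈ PySem.Set.inter (List.map Prod.fst e1) (List.map Prod.fst e2) <;>
          simp [Function.comp, h]
      rw [hkeys]
      simp [((hmemD a).mp ha).2]
    · rw [hitems, hKeq]
      have hemp : (PySem.Dict.empty : PySem.Dict String (List (String × String))).items = [] := rfl
      rw [hemp, List.nil_append, List.map_append]
      congr 1
      · show List.map _ (PySem.Dict.mk e1).items = _
        rw [List.map_map]
        refine List.map_congr_left ?_
        intro p hp
        have hp1 : p.1 ∈ List.map Prod.fst e1 := List.mem_map_of_mem hp
        by_cases hs : p.1 ∈ PySem.Set.inter (List.map Prod.fst e1) (List.map Prod.fst e2)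
        · simp only [Function.comp, hs, if_pos]
          rw [hg1 p hp]
        · have hx2 : p.1 ∉ List.map Prod.fst e2 := fun h => hs ((hmemS p.1).mpr ⟨hp1, h⟩)
          simp only [Function.comp, hs]
          rw [hg1 p hp, hg2none p.1 hx2, pvUpd_nil_right]
          simp
      · refine List.map_congr_left ?_
        intro x hx
        have hx1 : x ∉ List.map Prod.fst e1 := ((hmemD x).mp hx).2
        have hx2 : x ∈ List.map Prod.fst e2 := ((hmemD x).mp hx).1
        obtain ⟨q, hq, hqx⟩ := List.mem_map.mp hx2
        have e2v : (PySem.Dict.mk e2).getD x [] = q.2 := by rw [← hqx]; exact hg2 q hq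
        rw [hg1none x hx1, e2v]
        exact congrArg _ (Eq.trans (pvUpd_disjoint [] q.2 (hin2 q hq) (by simp)) (by simp)).symm
  · -- the conflict branch never fires under Pre_
    intro x hx
    have hx' : x ∈ List.map Prod.fst e1 ∨ x ∈ List.map Prod.fst e2 := by
      rw [hKeq] at hx
      rcases List.mem_append.mp hx with h | h
      · exact Or.inl h
      · exact Or.inr ((hmemD x).mp h).1
    simp [hval x hx']
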